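-- pv_equiv track=rewrite | github.com/ansys/pyaedt | pyaedt/modeler/MultiPartComponent.py | get_duplicated_object_names
-- ===== SOURCE A (Python) =====
-- def get_duplicated_object_names(start_name, n):
--     """
--     This function is a workaround for the duplicate_along_line method in hfss.modeler
--     which returns only the names of objects (and sheets) inside the 3D component after
--     duplication. There is no way to get the names of the objects in the group.
--
--     Parameters
--     ----------
--     start_name : str, required
--         Name of the object. Should end with a numeric index.
--     n : int , required
--         Number of repetitions.
--
--     Returns
--     -------
--     list of object names
--     """
--     suffix = ''
--     base_name_reverse = ''
--     done = False
--     for c in start_name[::-1]: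
--         if c.isdigit() and not done:
--             suffix = c + suffix
--         elif not c.isdigit() and not done:
--             done = True
--             base_name_reverse += c
--         else:
--             base_name_reverse += c
--     base_name = base_name_reverse[::-1]
--     names = []
--     if len(suffix) > 0:
--         d = int(suffix)  # Need to again reverse order
--         for m in range(n-1):
--             names.append(base_name + str(m+d+1))
--     return names
-- ===== SOURCE B (Python) =====
-- def get_duplicated_object_names(start_name, n):
--     i = len(start_name)
--     while i > 0 and start_name[i - 1].isdigit():
--         i -= 1
--     base_name = start_name[:i]
--     suffix = start_name[i:]
--     if suffix:
--         d = int(suffix)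
--         return [base_name + str(m + d + 1) for m in range(n - 1)]
--     return []
-- ===== Notes on version B (the rewrite author's own statement) =====
-- stated objective: simpler
-- what changed: Replaces the reverse-iteration with two string accumulator buffers and a done flag by a forward boundary scan (decrement an index while the preceding character is a digit), then slices base and suffix and builds the names with a list comprehension.
import Mathlib
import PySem

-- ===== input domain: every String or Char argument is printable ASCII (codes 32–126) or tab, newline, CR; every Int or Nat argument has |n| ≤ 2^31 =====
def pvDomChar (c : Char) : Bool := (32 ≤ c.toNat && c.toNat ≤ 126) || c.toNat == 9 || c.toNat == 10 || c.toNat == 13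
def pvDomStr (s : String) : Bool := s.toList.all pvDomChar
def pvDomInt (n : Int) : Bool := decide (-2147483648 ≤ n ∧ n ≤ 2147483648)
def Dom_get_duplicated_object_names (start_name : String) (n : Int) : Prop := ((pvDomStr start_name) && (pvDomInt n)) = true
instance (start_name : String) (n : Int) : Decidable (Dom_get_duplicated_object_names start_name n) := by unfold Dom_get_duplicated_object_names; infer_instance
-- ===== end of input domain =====

-- B replaces A's reverse-and-accumulate suffix parsing (two buffers + done flag) by a
-- forward boundary scan and slices; same cost, simpler decomposition.


-- ===== PORT A =====
-- one step of A's loop body over state (suffix, base_name_reverse, done)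
def pvStepA (st : List Char × List Char × Bool) (c : Char) : List Char × List Char × Bool :=
  if PySem.Chars.isdigit c && !st.2.2 then (c :: st.1, st.2.1, st.2.2)
  else if !(PySem.Chars.isdigit c) && !st.2.2 then (st.1, st.2.1 ++ [c], true)
  else (st.1, st.2.1 ++ [c], st.2.2)

def get_duplicated_object_names (start_name : String) (n : Int) : List String :=
  -- start_name[::-1] is the reversed code-point list (PySem.Str.slice?_none_none_neg_one)
  let st := (start_name.toList.reverse).foldl pvStepA ([], [], false)
  let suffix := st.1
  let base_name := st.2.1.reverse
  if suffix.length > 0 then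
    -- int(suffix): here suffix is a nonempty run of ASCII digits, so ofChars? is some; getD unreachable
    let d := (PySem.Int.ofChars? suffix).getD 0
    (PySem.List.pyRange 0 (n - 1) 1).foldl
      (fun names m => names ++ [String.ofList (base_name ++ PySem.Int.toChars (m + d + 1))]) []
  else []

-- ===== PORT B =====
-- the while loop: i := len; while i > 0 and s[i-1].isdigit(): i -= 1
def pvLoopB (cs : List Char) : Nat → Nat
  | 0 => 0
  | (i + 1) => if PySem.Chars.isdigit (cs.getD i ' ') then pvLoopB cs i else i + 1

def get_duplicated_object_names_alt (start_name : String) (n : Int) : List String :=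
  let cs := start_name.toList
  let i := pvLoopB cs cs.length
  let base_name := cs.take i   -- start_name[:i] with 0 ≤ i ≤ len (PySem.List.slice_to_natCast)
  let suffix := cs.drop i      -- start_name[i:]            (PySem.List.slice_from_natCast)
  if suffix ≠ [] then
    let d := (PySem.Int.ofChars? suffix).getD 0
    (PySem.List.pyRange 0 (n - 1) 1).map
      (fun m => String.ofList (base_name ++ PySem.Int.toChars (m + d + 1)))
  else []

-- ===== PRECONDITION & SPEC =====
def Spec_get_duplicated_object_names (start_name : String) (n : Int) (out : List String) : Prop := out = get_duplicated_object_names_alt start_name n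
instance (start_name : String) (n : Int) (out : List String) : Decidable (Spec_get_duplicated_object_names start_name n out) := by unfold Spec_get_duplicated_object_names; infer_instance

-- ===== CLAIM (what is proved, stated in full; the proofs are below) =====
def Claim_equal_get_duplicated_object_names : Prop := ∀ (start_name : String) (n : Int), Dom_get_duplicated_object_names start_name n → Spec_get_duplicated_object_names start_name n (get_duplicated_object_names start_name n)

-- ===== LEMMAS AND PROOFS =====

-- once done = true, A's loop only appends to base_name_reverse
theorem pvFoldA_done (r : List Char) (suf acc : List Char) :
    r.foldl pvStepA (suf, acc, true) = (suf, acc ++ r, true) := by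
  induction r generalizing acc with
  | nil => simp
  | cons c r ih =>
      simp only [List.foldl_cons, pvStepA]
      split
      · simp_all
      · split
        · simp_all
        · rw [ih]
          simp

-- A's loop from a fresh (done = false) state: takeWhile/dropWhile characterisation
theorem pvFoldA_false (r : List Char) (suf acc : List Char) :
    r.foldl pvStepA (suf, acc, false) =
      ((r.takeWhile PySem.Chars.isdigit).reverse ++ suf,
       acc ++ r.dropWhile PySem.Chars.isdigit,
       !(r.dropWhile PySem.Chars.isdigit).isEmpty) := by
  induction r generalizing suf acc with
  | nil => simp
  | cons c r ih =>
      simp only [List.foldl_cons, pvStepA]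
      by_cases h : PySem.Chars.isdigit c
      · simp only [h, List.takeWhile_cons, List.dropWhile_cons]
        simp [ih]
      · simp only [h, List.takeWhile_cons, List.dropWhile_cons]
        simp [pvFoldA_done]

-- B's while loop computes len minus the length of the trailing digit run
theorem pvLoopB_eq (cs : List Char) (i : Nat) (hi : i ≤ cs.length) :
    pvLoopB cs i = i - (((cs.take i).reverse).takeWhile PySem.Chars.isdigit).length := by
  induction i with
  | zero => simp [pvLoopB]
  | succ i ih =>
      have hlt : i < cs.length := hi
      have htake : cs.take (i + 1) = cs.take i ++ [cs[i]] := by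
        rw [List.take_add_one, List.getElem?_eq_getElem hlt]
        rfl
      have hget : cs.getD i ' ' = cs[i] := by
        simp [List.getD, List.getElem?_eq_getElem hlt]
      rw [show pvLoopB cs (i + 1) = if PySem.Chars.isdigit (cs.getD i ' ') then pvLoopB cs i
            else i + 1 from rfl, hget, htake]
      by_cases h : PySem.Chars.isdigit cs[i]
      · rw [if_pos h, ih (Nat.le_of_lt hlt)]
        have hle : (((cs.take i).reverse).takeWhile PySem.Chars.isdigit).length ≤ i := by
          calc (((cs.take i).reverse).takeWhile PySem.Chars.isdigit).length
              ≤ ((cs.take i).reverse).length := (List.takeWhile_prefix _).length_le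
            _ ≤ i := by simp
        simp only [List.reverse_append, List.reverse_cons, List.reverse_nil, List.nil_append,
          List.singleton_append, List.takeWhile_cons, h, if_pos, List.length_cons]
        omega
      · rw [if_neg h]
        simp only [List.reverse_append, List.reverse_cons, List.reverse_nil, List.nil_append,
          List.singleton_append, List.takeWhile_cons, h, Bool.false_eq_true, if_false,
          List.length_nil]
        omega

-- foldl-append builds the same list as map
theorem pvFoldAppendMap (f : Int → String) (l : List Int) (init : List String) :
    l.foldl (fun names m => names ++ [f m]) init = init ++ l.map f := by
  induction l generalizing init with
  | nil => simp
  | cons x l ih => simp [ih]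

-- ===== VERDICT (by name: the statement is the Claim_ definition above) =====
theorem get_duplicated_object_names_spec : Claim_equal_get_duplicated_object_names := by
  intro start_name n _
  unfold Spec_get_duplicated_object_names
  unfold get_duplicated_object_names get_duplicated_object_names_alt
  simp only [pvFoldA_false, List.append_nil, List.nil_append]
  set cs := start_name.toList with hcs
  set r := cs.reverse with hr
  have hlen : pvLoopB cs cs.length =
      cs.length - (r.takeWhile PySem.Chars.isdigit).length := by
    rw [pvLoopB_eq cs cs.length (Nat.le_refl _)]
    simp [hr]
  have hdecomp : cs = (r.dropWhile PySem.Chars.isdigit).reverse ++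
      (r.takeWhile PySem.Chars.isdigit).reverse := by
    conv_lhs => rw [show cs = r.reverse by simp [hr]]
    rw [← List.reverse_append, List.takeWhile_append_dropWhile]
  have hlenEq : ((r.dropWhile PySem.Chars.isdigit).reverse).length =
      cs.length - (r.takeWhile PySem.Chars.isdigit).length := by
    have h1 : (r.takeWhile PySem.Chars.isdigit).length +
        (r.dropWhile PySem.Chars.isdigit).length = cs.length := by
      have := congrArg List.length (List.takeWhile_append_dropWhile
        (p := PySem.Chars.isdigit) (l := r))
      simp only [List.length_append] at this
      simpa [hr] using this
    simp only [List.length_reverse]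
    omega
  have htakeB : cs.take (pvLoopB cs cs.length) = (r.dropWhile PySem.Chars.isdigit).reverse := by
    rw [hlen, ← hlenEq]
    conv_lhs => rw [hdecomp]
    exact List.take_left' rfl
  have hdropB : cs.drop (pvLoopB cs cs.length) = (r.takeWhile PySem.Chars.isdigit).reverse := by
    rw [hlen, ← hlenEq]
    conv_lhs => rw [hdecomp]
    exact List.drop_left' rfl
  rw [htakeB, hdropB]
  by_cases hs : (r.takeWhile PySem.Chars.isdigit).reverse = []
  · simp [hs]
  · have hpos : 0 < (r.takeWhile PySem.Chars.isdigit).length := by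
      rcases List.eq_nil_or_concat (r.takeWhile PySem.Chars.isdigit) with h | ⟨l, a, h⟩
      · exact absurd (by simp [h]) hs
      · simp [h]
    rw [if_pos (by simpa using hpos), if_pos hs]
    simpa using pvFoldAppendMap
      (fun m => String.ofList ((r.dropWhile PySem.Chars.isdigit).reverse ++
        PySem.Int.toChars (m + (PySem.Int.ofChars? (r.takeWhile PySem.Chars.isdigit).reverse).getD 0 + 1)))
      (PySem.List.pyRange 0 (n - 1) 1) []
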